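-- pv_equiv track=rewrite | github.com/Dyn-Bmg/WikiPath | link_validator.py | is_valid_link
-- ===== SOURCE A (Python) =====
-- def is_valid_link(link: str,seen: set) -> bool:
--     """
--     Determine whether a Wikipedia href is worth following.
--     Args:
--         link (str): Raw href string
--         seen (set): Set of visited page titles
--
--     Returns:
--         bool: True if the link should be followed, False otherwise
--     """
--     #
--     EXCLUDED_PREFIXES = [
--         "./Category:",
--         "./Template:",
--         "./Wikipedia:",
--         "./Help:",
--         "./File:",
--         "./Image:",
--         "./Talk:",
--         "./User:",
--         "./User_talk:",
--         "./Portal:",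
--         "./Draft:",
--         "./Module:",
--         "./MediaWiki:",
--         "./Special:",
--         "./Book:",
--         "./TimedText:",
--         "./Gadget:",
--         "./Template_talk:",
--     ]
--
--     EXCLUDED_SUFFIXES = [
--         "_(identifier)",
--     ]
--
--     if any(link.startswith(prefix) for prefix in EXCLUDED_PREFIXES):
--         return False
--
--     if any(link.endswith(suffix) for suffix in EXCLUDED_SUFFIXES):
--         return False
--
--     if "#" in link:
--         return False
--
--     if not link or link.strip() == "":
--         return False
--
--     #Normalise to the format used in 'seen'
--     if link.replace('_', ' ').replace('./', '') in seen:
--         return False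
--
--     return True
-- ===== SOURCE B (Python) =====
-- _NAMESPACES = frozenset({
--     "Category", "Template", "Wikipedia", "Help", "File", "Image",
--     "Talk", "User", "User_talk", "Portal", "Draft", "Module",
--     "MediaWiki", "Special", "Book", "TimedText", "Gadget", "Template_talk",
-- })
--
--
-- def is_valid_link(link: str, seen: set) -> bool:
--     # Parse the namespace out of "./Namespace:..." once and look it up in a set,
--     # instead of scanning 18 prefixes.
--     if link.startswith("./"):
--         head, sep, _ = link[2:].partition(":")
--         if sep and head in _NAMESPACES:
--             return False
--     if link.endswith("_(identifier)"):
--         return False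
--     if "#" in link or not link.strip():
--         return False
--     return link.replace('_', ' ').replace('./', '') not in seen
-- ===== Notes on version B (the rewrite author's own statement) =====
-- stated objective: simpler
-- what changed: Replaces the scan over 18 './Namespace:' prefixes (each a startswith pass over the link) by parsing the namespace out of the link once (partition on the first ':') and one lookup in a frozenset of the 18 namespace names, and folds the remaining guards into a single fall-through with the '#'/blank tests merged.
import Mathlib
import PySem

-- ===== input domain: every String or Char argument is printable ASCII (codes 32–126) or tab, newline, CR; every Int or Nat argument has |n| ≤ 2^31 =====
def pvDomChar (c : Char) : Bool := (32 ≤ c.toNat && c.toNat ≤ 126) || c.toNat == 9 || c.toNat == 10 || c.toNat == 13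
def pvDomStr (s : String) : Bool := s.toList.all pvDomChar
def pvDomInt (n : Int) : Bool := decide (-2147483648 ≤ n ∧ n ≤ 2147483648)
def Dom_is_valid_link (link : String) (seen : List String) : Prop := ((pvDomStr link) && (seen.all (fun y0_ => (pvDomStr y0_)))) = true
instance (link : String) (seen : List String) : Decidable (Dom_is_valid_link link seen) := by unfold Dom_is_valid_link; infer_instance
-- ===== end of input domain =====

-- B replaces A's 18-prefix startswith scan by parsing the "./Namespace:" head once and
-- testing the namespace against a set; the remaining guards are folded into one pass.
-- Objective: simpler.


-- ===== PORT A =====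
-- 'not link' / 'link.strip() == ""' are ported as emptiness of the toList (same value);
-- 'link in seen' (a set of strings) is List.contains on the distinct-element list.
def is_valid_link (link : String) (seen : List String) : Bool :=
  let EXCLUDED_PREFIXES : List String :=
    ["./Category:", "./Template:", "./Wikipedia:", "./Help:", "./File:", "./Image:",
     "./Talk:", "./User:", "./User_talk:", "./Portal:", "./Draft:", "./Module:",
     "./MediaWiki:", "./Special:", "./Book:", "./TimedText:", "./Gadget:", "./Template_talk:"]
  let EXCLUDED_SUFFIXES : List String := ["_(identifier)"]
  if EXCLUDED_PREFIXES.any (fun prefix_ => PySem.Str.startswith link prefix_) then false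
  else if EXCLUDED_SUFFIXES.any (fun suffix_ => PySem.Str.endswith link suffix_) then false
  else if PySem.Str.isIn "#" link then false
  else if link.toList.isEmpty || (PySem.Str.strip link).toList.isEmpty then false
  else if seen.contains (PySem.Str.replace (PySem.Str.replace link "_" " ") "./" "") then false
  else true

-- ===== PORT B =====
-- the frozenset of namespace names (Source B's _NAMESPACES), held as distinct char lists
def pvNamespaces : List (List Char) :=
  ["Category".toList, "Template".toList, "Wikipedia".toList, "Help".toList, "File".toList,
   "Image".toList, "Talk".toList, "User".toList, "User_talk".toList, "Portal".toList,
   "Draft".toList, "Module".toList, "MediaWiki".toList, "Special".toList, "Book".toList,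
   "TimedText".toList, "Gadget".toList, "Template_talk".toList]

-- Source B's fall-through after the namespace guard (suffix, '#'/blank, seen)
def pvRestCheck (link : String) (seen : List String) : Bool :=
  if PySem.Str.endswith link "_(identifier)" then false
  else if PySem.Str.isIn "#" link || (PySem.Str.strip link).toList.isEmpty then false
  else !(seen.contains (PySem.Str.replace (PySem.Str.replace link "_" " ") "./" ""))

def is_valid_link_alt (link : String) (seen : List String) : Bool :=
  if PySem.Str.startswith link "./" then
    -- head, sep, _ = link[2:].partition(":") — partition ported by hand (exact on every
    -- input: head = chars before the first ':', sep nonempty iff some ':' occurs)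
    let rest := link.toList.drop 2
    let head := rest.takeWhile (fun c => c != ':')
    let sep := rest.dropWhile (fun c => c != ':')
    if !sep.isEmpty && pvNamespaces.contains head then false
    else pvRestCheck link seen
  else pvRestCheck link seen

-- ===== PRECONDITION & SPEC =====
def Spec_is_valid_link (link : String) (seen : List String) (out : Bool) : Prop := out = is_valid_link_alt link seen
instance (link : String) (seen : List String) (out : Bool) : Decidable (Spec_is_valid_link link seen out) := by unfold Spec_is_valid_link; infer_instance

-- ===== CLAIM (what is proved, stated in full; the proofs are below) =====
def Claim_equal_is_valid_link : Prop := ∀ (link : String) (seen : List String), Dom_is_valid_link link seen → Spec_is_valid_link link seen (is_valid_link link seen)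

-- ===== LEMMAS AND PROOFS =====

-- "./Ns:" is a prefix of cs iff cs starts with "./" and (Ns ++ ":") is a prefix of the tail
lemma pv_prefix_split (x cs : List Char) :
    ('.' :: '/' :: x <+: cs) ↔ (['.', '/'] <+: cs ∧ x <+: cs.drop 2) := by
  match cs with
  | [] => simp
  | [a] => simp [List.cons_prefix_cons]
  | a :: b :: t => simp [List.cons_prefix_cons, and_assoc]

-- for a namespace name without ':', "Ns:" prefixes rest iff partition head = Ns and a ':' occurs
lemma pv_partition_char (ns rest : List Char) (h : ':' ∉ ns) :
    (ns ++ [':'] <+: rest) ↔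
      (rest.takeWhile (fun c => c != ':') = ns ∧ rest.dropWhile (fun c => c != ':') ≠ []) := by
  induction ns generalizing rest with
  | nil =>
    cases rest with
    | nil => simp
    | cons c t =>
      by_cases hc : c = ':'
      · subst hc; simp [List.cons_prefix_cons]
      · simp [List.cons_prefix_cons, hc, Ne.symm hc]
  | cons a ns ih =>
    have ha : a ≠ ':' := fun e => h (e ▸ List.mem_cons_self)
    have h' : ':' ∉ ns := fun m => h (List.mem_cons_of_mem _ m)
    cases rest with
    | nil => simp
    | cons c t =>
      by_cases hc : c = ':'
      · subst hc
        simp [List.cons_prefix_cons, ha]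
      · simp [List.cons_prefix_cons, hc, ih t h', and_assoc, eq_comm (a := c)]

-- the 18-prefix scan equals B's namespace parse
lemma pv_scan_eq (cs : List Char) :
    (["./Category:", "./Template:", "./Wikipedia:", "./Help:", "./File:", "./Image:",
      "./Talk:", "./User:", "./User_talk:", "./Portal:", "./Draft:", "./Module:",
      "./MediaWiki:", "./Special:", "./Book:", "./TimedText:", "./Gadget:",
      "./Template_talk:"].any (fun p => p.toList.isPrefixOf cs)) =
    ((['.', '/'].isPrefixOf cs) &&
      (!((cs.drop 2).dropWhile (fun c => c != ':')).isEmpty &&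
        pvNamespaces.contains ((cs.drop 2).takeWhile (fun c => c != ':')))) := by
  rw [Bool.eq_iff_iff]
  simp only [List.any_cons, List.any_nil, Bool.or_eq_true, Bool.and_eq_true,
    List.isPrefixOf_iff_prefix, pvNamespaces, List.contains_cons,
    List.contains_nil, beq_iff_eq, Bool.not_eq_true', List.isEmpty_eq_false_iff,
    Bool.false_eq_true, or_false]
  have e1 : "./Category:".toList = '.' :: '/' :: ("Category".toList ++ [':']) := rfl
  have e2 : "./Template:".toList = '.' :: '/' :: ("Template".toList ++ [':']) := rfl
  have e3 : "./Wikipedia:".toList = '.' :: '/' :: ("Wikipedia".toList ++ [':']) := rfl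
  have e4 : "./Help:".toList = '.' :: '/' :: ("Help".toList ++ [':']) := rfl
  have e5 : "./File:".toList = '.' :: '/' :: ("File".toList ++ [':']) := rfl
  have e6 : "./Image:".toList = '.' :: '/' :: ("Image".toList ++ [':']) := rfl
  have e7 : "./Talk:".toList = '.' :: '/' :: ("Talk".toList ++ [':']) := rfl
  have e8 : "./User:".toList = '.' :: '/' :: ("User".toList ++ [':']) := rfl
  have e9 : "./User_talk:".toList = '.' :: '/' :: ("User_talk".toList ++ [':']) := rfl
  have e10 : "./Portal:".toList = '.' :: '/' :: ("Portal".toList ++ [':']) := rfl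
  have e11 : "./Draft:".toList = '.' :: '/' :: ("Draft".toList ++ [':']) := rfl
  have e12 : "./Module:".toList = '.' :: '/' :: ("Module".toList ++ [':']) := rfl
  have e13 : "./MediaWiki:".toList = '.' :: '/' :: ("MediaWiki".toList ++ [':']) := rfl
  have e14 : "./Special:".toList = '.' :: '/' :: ("Special".toList ++ [':']) := rfl
  have e15 : "./Book:".toList = '.' :: '/' :: ("Book".toList ++ [':']) := rfl
  have e16 : "./TimedText:".toList = '.' :: '/' :: ("TimedText".toList ++ [':']) := rfl
  have e17 : "./Gadget:".toList = '.' :: '/' :: ("Gadget".toList ++ [':']) := rfl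
  have e18 : "./Template_talk:".toList = '.' :: '/' :: ("Template_talk".toList ++ [':']) := rfl
  rw [e1, e2, e3, e4, e5, e6, e7, e8, e9, e10, e11, e12, e13, e14, e15, e16, e17, e18]
  have s1 := pv_prefix_split ("Category".toList ++ [':']) cs
  have s2 := pv_prefix_split ("Template".toList ++ [':']) cs
  have s3 := pv_prefix_split ("Wikipedia".toList ++ [':']) cs
  have s4 := pv_prefix_split ("Help".toList ++ [':']) cs
  have s5 := pv_prefix_split ("File".toList ++ [':']) cs
  have s6 := pv_prefix_split ("Image".toList ++ [':']) cs
  have s7 := pv_prefix_split ("Talk".toList ++ [':']) cs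
  have s8 := pv_prefix_split ("User".toList ++ [':']) cs
  have s9 := pv_prefix_split ("User_talk".toList ++ [':']) cs
  have s10 := pv_prefix_split ("Portal".toList ++ [':']) cs
  have s11 := pv_prefix_split ("Draft".toList ++ [':']) cs
  have s12 := pv_prefix_split ("Module".toList ++ [':']) cs
  have s13 := pv_prefix_split ("MediaWiki".toList ++ [':']) cs
  have s14 := pv_prefix_split ("Special".toList ++ [':']) cs
  have s15 := pv_prefix_split ("Book".toList ++ [':']) cs
  have s16 := pv_prefix_split ("TimedText".toList ++ [':']) cs
  have s17 := pv_prefix_split ("Gadget".toList ++ [':']) cs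
  have s18 := pv_prefix_split ("Template_talk".toList ++ [':']) cs
  rw [s1, s2, s3, s4, s5, s6, s7, s8, s9, s10, s11, s12, s13, s14, s15, s16, s17, s18]
  have q1 := pv_partition_char "Category".toList (cs.drop 2) (by decide)
  have q2 := pv_partition_char "Template".toList (cs.drop 2) (by decide)
  have q3 := pv_partition_char "Wikipedia".toList (cs.drop 2) (by decide)
  have q4 := pv_partition_char "Help".toList (cs.drop 2) (by decide)
  have q5 := pv_partition_char "File".toList (cs.drop 2) (by decide)
  have q6 := pv_partition_char "Image".toList (cs.drop 2) (by decide)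
  have q7 := pv_partition_char "Talk".toList (cs.drop 2) (by decide)
  have q8 := pv_partition_char "User".toList (cs.drop 2) (by decide)
  have q9 := pv_partition_char "User_talk".toList (cs.drop 2) (by decide)
  have q10 := pv_partition_char "Portal".toList (cs.drop 2) (by decide)
  have q11 := pv_partition_char "Draft".toList (cs.drop 2) (by decide)
  have q12 := pv_partition_char "Module".toList (cs.drop 2) (by decide)
  have q13 := pv_partition_char "MediaWiki".toList (cs.drop 2) (by decide)
  have q14 := pv_partition_char "Special".toList (cs.drop 2) (by decide)
  have q15 := pv_partition_char "Book".toList (cs.drop 2) (by decide)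
  have q16 := pv_partition_char "TimedText".toList (cs.drop 2) (by decide)
  have q17 := pv_partition_char "Gadget".toList (cs.drop 2) (by decide)
  have q18 := pv_partition_char "Template_talk".toList (cs.drop 2) (by decide)
  rw [q1, q2, q3, q4, q5, q6, q7, q8, q9, q10, q11, q12, q13, q14, q15, q16, q17, q18]
  simp only [and_or_left]
  simp only [and_comm]

-- the two emptiness tests agree: a link that is empty also strips to empty
lemma pv_empty_eq (link : String) :
    (link.toList.isEmpty || (PySem.Str.strip link).toList.isEmpty)
      = (PySem.Str.strip link).toList.isEmpty := by
  cases h : link.toList with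
  | nil =>
    simp only [PySem.Str.toList_strip, h, List.isEmpty_nil, Bool.true_or]
    decide
  | cons a t => simp [h]

-- both guard cascades, abstracted to their six boolean atoms
lemma pv_shape (q n s h e m : Bool) :
    (if q && n then false else if s then false else if h then false
       else if e then false else if m then false else true)
    = (if q then (if n then false
         else if s then false else if h || e then false else !m)
       else if s then false else if h || e then false else !m) := by
  cases q <;> cases n <;> cases s <;> cases h <;> cases e <;> cases m <;> rfl

-- ===== VERDICT (by name: the statement is the Claim_ definition above) =====
theorem is_valid_link_spec : Claim_equal_is_valid_link := by
  intro link seen _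
  show is_valid_link link seen = is_valid_link_alt link seen
  have e0 : "./".toList = ['.', '/'] := rfl
  simp only [is_valid_link, is_valid_link_alt, pvRestCheck,
    PySem.Str.startswith, PySem.Chars.startswith, e0]
  simp only [pv_scan_eq link.toList]
  simp only [pv_empty_eq, List.any_cons, List.any_nil, Bool.or_false]
  exact pv_shape _ _ _ _ _ _
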